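-- pv_equiv track=rewrite | github.com/jainharshu01/ai-builder | renderer.py | render_recommended_actions
-- ===== SOURCE A (Python) =====
-- from typing import Dict, List, Any
--
-- SEVERITY_COLORS = {
--     "High": ("#FF3B30", "#FFF0EF"),
--     "Medium": ("#FF9500", "#FFF8EE"),
--     "Low": ("#34C759", "#F0FFF4"),
--     "Immediate": ("#FF3B30", "#FFF0EF"),
--     "Short-term": ("#FF9500", "#FFF8EE"),
--     "Long-term": ("#34C759", "#F0FFF4"),
-- }
--
-- def render_recommended_actions(actions: List[Dict]) -> str:
--     if not actions:
--         return "<p>Not Available</p>"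
--
--     # Group by priority
--     priority_order = ["Immediate", "Short-term", "Long-term"]
--     grouped = {p: [] for p in priority_order}
--
--     for action in actions:
--         priority = action.get("priority", "Short-term")
--         if priority in grouped:
--             grouped[priority].append(action)
--         else:
--             grouped["Short-term"].append(action)
--
--     parts = []
--     for priority in priority_order:
--         items = grouped[priority]
--         if not items:
--             continue
--
--         color, bg = SEVERITY_COLORS.get(priority, ("#666", "#f5f5f5"))
--         rows = "".join(f'''
--         <div class="action-item" style="border-left: 3px solid {color};">
--             <div class="action-area">{action.get("area", "General")}</div>
--             <div class="action-text">{action.get("action", "Not Available")}</div>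
--             <div class="action-method">{action.get("method", "")}</div>
--         </div>
--         ''' for action in items)
--
--         parts.append(f'''
--         <div class="action-group">
--             <div class="action-group-header" style="background:{bg};color:{color};border:1px solid {color};">
--                 {priority} Action Required
--             </div>
--             {rows}
--         </div>
--         ''')
--
--     return "\n".join(parts)
-- ===== SOURCE B (Python) =====
-- # B: no grouping dict — one filtering pass per priority bucket, colors carried in the bucket table.
-- GROUPS = [
--     ("Immediate", "#FF3B30", "#FFF0EF"),
--     ("Short-term", "#FF9500", "#FFF8EE"),
--     ("Long-term", "#34C759", "#F0FFF4"),
-- ]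
--
--
-- def _bucket(action):
--     p = action.get("priority", "Short-term")
--     return p if p in ("Immediate", "Short-term", "Long-term") else "Short-term"
--
--
-- def _row(color, action):
--     return f'''
--         <div class="action-item" style="border-left: 3px solid {color};">
--             <div class="action-area">{action.get("area", "General")}</div>
--             <div class="action-text">{action.get("action", "Not Available")}</div>
--             <div class="action-method">{action.get("method", "")}</div>
--         </div>
--         '''
--
--
-- def _group(priority, color, bg, items):
--     rows = "".join(_row(color, a) for a in items)
--     return f'''
--         <div class="action-group">
--             <div class="action-group-header" style="background:{bg};color:{color};border:1px solid {color};">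
--                 {priority} Action Required
--             </div>
--             {rows}
--         </div>
--         '''
--
--
-- def render_recommended_actions(actions):
--     if not actions:
--         return "<p>Not Available</p>"
--     parts = [
--         _group(priority, color, bg, items)
--         for priority, color, bg in GROUPS
--         if (items := [a for a in actions if _bucket(a) == priority])
--     ]
--     return "\n".join(parts)
-- ===== Notes on version B (the rewrite author's own statement) =====
-- stated objective: simpler
-- what changed: Drops A's dict-based grouping pass entirely: B scans the actions once per priority with a filtering comprehension over a bucket table that also carries the colors, so no mutable grouped dict and no SEVERITY_COLORS lookup remain.
import Mathlib
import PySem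

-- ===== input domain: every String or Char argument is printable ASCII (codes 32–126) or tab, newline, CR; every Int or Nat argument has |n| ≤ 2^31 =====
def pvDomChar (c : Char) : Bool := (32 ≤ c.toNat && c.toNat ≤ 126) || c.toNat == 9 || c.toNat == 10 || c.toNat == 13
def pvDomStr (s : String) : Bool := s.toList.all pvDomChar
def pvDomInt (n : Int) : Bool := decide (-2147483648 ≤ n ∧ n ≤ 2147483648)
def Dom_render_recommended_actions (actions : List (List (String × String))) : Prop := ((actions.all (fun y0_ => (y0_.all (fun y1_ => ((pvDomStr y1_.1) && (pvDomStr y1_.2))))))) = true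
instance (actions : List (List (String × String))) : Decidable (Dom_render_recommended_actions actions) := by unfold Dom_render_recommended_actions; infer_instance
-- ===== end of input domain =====

-- B drops A's dict-based grouping pass: one filtering scan per priority over a bucket table
-- that also carries the colors (objective: simpler; same output everywhere).

-- action.get(k, dflt) on a Python dict passed as an association list (first match wins)
def pvGet (a : List (String × String)) (k dflt : String) : String :=
  (PySem.Dict.mk a).getD k dflt

-- the HTML f-string templates (shared data: both Pythons emit byte-identical templates)
def pvRowHtml (color : String) (a : List (String × String)) : String :=
  "\n        <div class=\"action-item\" style=\"border-left: 3px solid " ++ color ++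
  ";\">\n            <div class=\"action-area\">" ++ pvGet a "area" "General" ++
  "</div>\n            <div class=\"action-text\">" ++ pvGet a "action" "Not Available" ++
  "</div>\n            <div class=\"action-method\">" ++ pvGet a "method" "" ++
  "</div>\n        </div>\n        "

def pvGroupHtml (priority color bg rows : String) : String :=
  "\n        <div class=\"action-group\">\n            <div class=\"action-group-header\" style=\"background:" ++
  bg ++ ";color:" ++ color ++ ";border:1px solid " ++ color ++ ";\">\n                " ++
  priority ++ " Action Required\n            </div>\n            " ++ rows ++
  "\n        </div>\n        "

-- ===== PORT A =====
def pvSeverityColors : PySem.Dict String (String × String) :=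
  PySem.Dict.ofList [("High", ("#FF3B30", "#FFF0EF")), ("Medium", ("#FF9500", "#FFF8EE")),
    ("Low", ("#34C759", "#F0FFF4")), ("Immediate", ("#FF3B30", "#FFF0EF")),
    ("Short-term", ("#FF9500", "#FFF8EE")), ("Long-term", ("#34C759", "#F0FFF4"))]

-- the body of A's grouping loop
-- priority = action.get("priority", "Short-term")
def pvPrio (a : List (String × String)) : String := pvGet a "priority" "Short-term"

def pvStepA (d : PySem.Dict String (List (List (String × String)))) (a : List (String × String)) :
    PySem.Dict String (List (List (String × String))) :=
  if d.contains (pvPrio a) then d.modify (pvPrio a) [] (· ++ [a])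
  else d.modify "Short-term" [] (· ++ [a])

def pvPriorityOrder : List String := ["Immediate", "Short-term", "Long-term"]

-- grouped = {p: [] for p in priority_order}, then the grouping loop over actions
def pvGrouped (actions : List (List (String × String))) :
    PySem.Dict String (List (List (String × String))) :=
  actions.foldl pvStepA (pvPriorityOrder.foldl (fun d p => d.insert p []) PySem.Dict.empty)

-- the body of A's rendering loop over priority_order, appending to parts
def pvPartStepA (grouped : PySem.Dict String (List (List (String × String))))
    (parts : List String) (priority : String) : List String :=
  if grouped.getD priority [] = [] then parts
  else
    (parts ++ [pvGroupHtml priority (pvSeverityColors.getD priority ("#666", "#f5f5f5")).1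
      (pvSeverityColors.getD priority ("#666", "#f5f5f5")).2
      (PySem.Str.join "" ((grouped.getD priority []).map
        (pvRowHtml (pvSeverityColors.getD priority ("#666", "#f5f5f5")).1)))])

def render_recommended_actions (actions : List (List (String × String))) : String :=
  if actions = [] then "<p>Not Available</p>"
  else PySem.Str.join "\n" (pvPriorityOrder.foldl (pvPartStepA (pvGrouped actions)) [])

-- ===== PORT B =====
def pvGroupsB : List (String × String × String) :=
  [("Immediate", "#FF3B30", "#FFF0EF"), ("Short-term", "#FF9500", "#FFF8EE"),
   ("Long-term", "#34C759", "#F0FFF4")]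

-- the bucket an action lands in: its priority if known, else "Short-term"
def pvBucket (a : List (String × String)) : String :=
  if pvPrio a == "Immediate" || pvPrio a == "Short-term" || pvPrio a == "Long-term" then pvPrio a
  else "Short-term"

def render_recommended_actions_alt (actions : List (List (String × String))) : String :=
  if actions = [] then "<p>Not Available</p>"
  else
    PySem.Str.join "\n" (pvGroupsB.filterMap (fun g =>
      let items := actions.filter (fun a => pvBucket a == g.1)
      if items = [] then none
      else some (pvGroupHtml g.1 g.2.1 g.2.2 (PySem.Str.join "" (items.map (pvRowHtml g.2.1))))))

-- ===== PRECONDITION & SPEC =====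
def Spec_render_recommended_actions (actions : List (List (String × String))) (out : String) : Prop := out = render_recommended_actions_alt actions
instance (actions : List (List (String × String))) (out : String) : Decidable (Spec_render_recommended_actions actions out) := by unfold Spec_render_recommended_actions; infer_instance

-- ===== CLAIM (what is proved, stated in full; the proofs are below) =====
def Claim_equal_render_recommended_actions : Prop := ∀ (actions : List (List (String × String))), Dom_render_recommended_actions actions → Spec_render_recommended_actions actions (render_recommended_actions actions)

-- ===== LEMMAS AND PROOFS =====

-- A's grouping loop, started on a dict with exactly the three priority keys, collects
-- into bucket p exactly the actions whose pvBucket is p (the fold preserves the keys).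
theorem pvFoldA_getD (l : List (List (String × String)))
    (d : PySem.Dict String (List (List (String × String))))
    (h : d.keys = ["Immediate", "Short-term", "Long-term"]) (p : String) :
    (l.foldl pvStepA d).getD p [] = d.getD p [] ++ l.filter (fun a => pvBucket a == p) := by
  induction l generalizing d with
  | nil => simp
  | cons a l ih =>
    have hc : d.contains (pvPrio a) =
        (pvPrio a == "Immediate" || pvPrio a == "Short-term" || pvPrio a == "Long-term") := by
      rw [PySem.Dict.contains_eq_decide_mem_keys, h]
      by_cases h1 : pvPrio a = "Immediate" <;> by_cases h2 : pvPrio a = "Short-term" <;>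
        by_cases h3 : pvPrio a = "Long-term" <;> simp [h1, h2, h3]
    have hb : pvStepA d a = d.modify (pvBucket a) [] (· ++ [a]) := by
      unfold pvStepA pvBucket
      rw [hc]
      split <;> rfl
    have hmem : pvBucket a ∈ d.keys := by
      rw [h]; unfold pvBucket
      split
      · rename_i hq
        simp only [Bool.or_eq_true, beq_iff_eq] at hq
        rcases hq with (hq | hq) | hq <;> simp [hq]
      · simp
    have hkeys : (pvStepA d a).keys = ["Immediate", "Short-term", "Long-term"] := by
      rw [hb, PySem.Dict.keys_modify, PySem.Dict.keys_insert_of_contains]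
      · exact h
      · rw [PySem.Dict.contains_iff_mem_keys]; exact hmem
    rw [List.foldl_cons, ih (pvStepA d a) hkeys, hb, PySem.Dict.getD_modify]
    by_cases hpb : p = pvBucket a
    · simp [hpb]
    · have hepb : (pvBucket a == p) = false := by simp [Ne.symm hpb]
      simp [hpb, hepb]

-- the initial grouped dict of A has exactly the three priority keys, all empty
theorem pvGrouped0_keys :
    ((["Immediate", "Short-term", "Long-term"] : List String).foldl
      (fun d p => d.insert p []) (PySem.Dict.empty : PySem.Dict String (List (List (String × String))))).keys
      = ["Immediate", "Short-term", "Long-term"] := by decide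

theorem pvGrouped0_getD (p : String) :
    ((["Immediate", "Short-term", "Long-term"] : List String).foldl
      (fun d p => d.insert p []) (PySem.Dict.empty : PySem.Dict String (List (List (String × String))))).getD p []
      = [] := by
  simp only [List.foldl_cons, List.foldl_nil, PySem.Dict.getD_insert]
  split_ifs <;> simp [PySem.Dict.getD_empty]

-- the SEVERITY_COLORS lookups A performs, evaluated on the three literal priorities
theorem pvColors_I : pvSeverityColors.getD "Immediate" ("#666", "#f5f5f5") = ("#FF3B30", "#FFF0EF") := by decide
theorem pvColors_S : pvSeverityColors.getD "Short-term" ("#666", "#f5f5f5") = ("#FF9500", "#FFF8EE") := by decide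
theorem pvColors_L : pvSeverityColors.getD "Long-term" ("#666", "#f5f5f5") = ("#34C759", "#F0FFF4") := by decide

-- A's rendering step, when grouped holds exactly the filtered buckets: a conditional singleton
theorem pvPartStep_eq (actions : List (List (String × String))) (p : String)
    (hp : (pvGrouped actions).getD p [] = actions.filter (fun a => pvBucket a == p))
    (c b : String) (hcb : pvSeverityColors.getD p ("#666", "#f5f5f5") = (c, b)) (parts : List String) :
    pvPartStepA (pvGrouped actions) parts p =
      parts ++ (if actions.filter (fun a => pvBucket a == p) = [] then []
        else [pvGroupHtml p c b
          (PySem.Str.join "" ((actions.filter (fun a => pvBucket a == p)).map (pvRowHtml c)))]) := by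
  unfold pvPartStepA
  rw [hp, hcb]
  split_ifs with hi <;> simp

-- ===== VERDICT (by name: the statement is the Claim_ definition above) =====
theorem render_recommended_actions_spec : Claim_equal_render_recommended_actions := by
  intro actions _
  unfold Spec_render_recommended_actions render_recommended_actions render_recommended_actions_alt
  by_cases h : actions = []
  · simp [h]
  · have hg : ∀ p : String,
        (pvGrouped actions).getD p [] = actions.filter (fun a => pvBucket a == p) := by
      intro p
      unfold pvGrouped pvPriorityOrder
      rw [pvFoldA_getD actions _ pvGrouped0_keys p, pvGrouped0_getD, List.nil_append]
    simp only [h, if_false]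
    simp only [pvPriorityOrder, pvGroupsB, List.foldl_cons, List.foldl_nil,
      pvPartStep_eq actions "Immediate" (hg _) _ _ pvColors_I,
      pvPartStep_eq actions "Short-term" (hg _) _ _ pvColors_S,
      pvPartStep_eq actions "Long-term" (hg _) _ _ pvColors_L]
    by_cases eI : actions.filter (fun a => pvBucket a == "Immediate") = [] <;>
      by_cases eS : actions.filter (fun a => pvBucket a == "Short-term") = [] <;>
        by_cases eL : actions.filter (fun a => pvBucket a == "Long-term") = [] <;>
          simp [eI, eS, eL, -List.filter_eq_nil_iff]
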